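-- pv_equiv track=rewrite | github.com/kapivara/mentoria-danielgustavo | src/estrutura_sequencial/exercicio_quarenta.py | process
-- ===== SOURCE A (Python) =====
-- from enum import Enum
--
-- class LabelType(Enum):
--     SINGULAR = 0
--     PLURAL = 1
--
-- def process(num, initial=""):
--
--     inner_num = num if isinstance(num, str) else str(abs(num))
--
--     labels = [
--         ("centena de milhar", "centenas de milhar"),
--         ("dezena de milhar", "dezenas de milhar"),
--         ("unidade de milhar", "unidades de milhar"),
--         ("centena", "centenas"),
--         ("dezena", "dezenas"),
--         ("unidade", "unidades"),
--     ]
--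
--     label_type = LabelType.SINGULAR if inner_num[0] == "1" else LabelType.PLURAL
--     label = labels[-len(inner_num)][label_type.value]
--
--     result = f"{inner_num[0]} {label}"
--
--     return (
--         process(inner_num[1:], f"{initial}, {result}")
--         if len(inner_num) != 1
--         else f"{initial} e {result}"[2:].strip()
--     )
-- ===== SOURCE B (Python) =====
-- def process(num, initial=""):
--     inner = num if isinstance(num, str) else str(abs(num))
--
--     labels = [
--         ("centena de milhar", "centenas de milhar"),
--         ("dezena de milhar", "dezenas de milhar"),
--         ("unidade de milhar", "unidades de milhar"),
--         ("centena", "centenas"),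
--         ("dezena", "dezenas"),
--         ("unidade", "unidades"),
--     ]
--
--     n = len(inner)
--     parts = [
--         f"{inner[i]} {labels[i - n][0 if inner[i] == '1' else 1]}"
--         for i in range(n)
--     ]
--
--     s = initial
--     for p in parts[:-1]:
--         s = s + ", " + p
--     s = s + " e " + parts[-1]
--     return s[2:].strip()
-- ===== Notes on version B (the rewrite author's own statement) =====
-- stated objective: alternative
-- what changed: Replaces A's tail recursion (accumulator threaded through recursive calls on the string tail) by a flat list comprehension over the digit indices building all place-value parts at once, followed by an iterative join and one final [2:].strip().
import Mathlib
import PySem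

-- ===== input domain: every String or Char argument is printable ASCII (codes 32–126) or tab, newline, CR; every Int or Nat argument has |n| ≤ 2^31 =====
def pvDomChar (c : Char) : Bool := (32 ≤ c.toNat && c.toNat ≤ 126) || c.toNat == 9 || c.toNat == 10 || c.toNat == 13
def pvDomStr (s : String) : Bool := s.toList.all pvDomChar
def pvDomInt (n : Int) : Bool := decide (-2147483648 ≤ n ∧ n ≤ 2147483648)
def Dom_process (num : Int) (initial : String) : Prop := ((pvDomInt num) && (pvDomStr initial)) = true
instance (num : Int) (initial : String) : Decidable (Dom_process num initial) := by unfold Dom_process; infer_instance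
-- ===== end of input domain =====

-- B replaces A's tail recursion by a comprehension over digit indices plus an iterative join
-- (objective: alternative decomposition, same cost). Equivalence of the return values is proved
-- on Pre_ (|num| ≤ 999999, exactly where Python A returns instead of raising IndexError).

-- ===== PORT A =====
def pvLabels : List (String × String) :=
  [("centena de milhar", "centenas de milhar"),
   ("dezena de milhar", "dezenas de milhar"),
   ("unidade de milhar", "unidades de milhar"),
   ("centena", "centenas"),
   ("dezena", "dezenas"),
   ("unidade", "unidades")]

-- recursion of A over inner_num as a list of chars; the [] case is where Python raises
-- IndexError (inner_num[0]) — outside Pre_, the returned "" is never claimed about.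
def pvProcA : List Char → String → String
  | [], _ => ""
  | c :: rest, initial =>
      let lbl := (PySem.List.pyGet? pvLabels (-((c :: rest).length : Int))).getD ("", "")
      let label := if c = '1' then lbl.1 else lbl.2
      let result := String.singleton c ++ " " ++ label
      if (c :: rest).length ≠ 1 then
        pvProcA rest (initial ++ ", " ++ result)
      else
        PySem.Str.strip (PySem.Str.slice (initial ++ " e " ++ result) (some 2) none)

def process (num : Int) (initial : String) : String :=
  pvProcA (PySem.Int.toChars |num|) initial

-- ===== PORT B =====
def pvAltCore (inner : List Char) (initial : String) : String :=
  let n : Int := inner.length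
  let parts := (PySem.List.pyRange 0 n 1).map (fun i =>
      let d := (PySem.List.pyGet? inner i).getD ' '
      let lbl := (PySem.List.pyGet? pvLabels (i - n)).getD ("", "")
      String.singleton d ++ " " ++ (if d = '1' then lbl.1 else lbl.2))
  let s := (PySem.List.slice parts none (some (-1))).foldl (fun s p => s ++ ", " ++ p) initial
  let s := s ++ " e " ++ ((PySem.List.pyGet? parts (-1)).getD "")
  PySem.Str.strip (PySem.Str.slice s (some 2) none)

def process_alt (num : Int) (initial : String) : String :=
  pvAltCore (PySem.Int.toChars |num|) initial

-- ===== PRECONDITION & SPEC =====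
-- Pre_ admits exactly the inputs on which Python A returns: for |num| ≥ 10^6 the digit string
-- has more than 6 digits and A raises IndexError on labels[-len(inner_num)].
def Pre_process (num : Int) (initial : String) : Prop := num.natAbs ≤ 999999
instance (num : Int) (initial : String) : Decidable (Pre_process num initial) := by
  unfold Pre_process; infer_instance
def pvWitness_process : Int × String := (123, "")
def Spec_process (num : Int) (initial : String) (out : String) : Prop := out = process_alt num initial
instance (num : Int) (initial : String) (out : String) : Decidable (Spec_process num initial out) := by unfold Spec_process; infer_instance

-- ===== CLAIM (what is proved, stated in full; the proofs are below) =====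
def Claim_equal_process : Prop := ∀ (num : Int) (initial : String), Dom_process num initial → Pre_process num initial → Spec_process num initial (process num initial)

-- ===== LEMMAS AND PROOFS =====

-- the two decompositions agree on every digit list of length 1..6
theorem pvKey (l : List Char) (h1 : 1 ≤ l.length) (h6 : l.length ≤ 6) (init : String) :
    pvProcA l init = pvAltCore l init := by
  rcases l with _ | ⟨a, _ | ⟨b, _ | ⟨c, _ | ⟨d, _ | ⟨e, _ | ⟨f, _ | ⟨g, rest⟩⟩⟩⟩⟩⟩⟩
  · simp at h1
  all_goals first
    | (simp only [List.length_cons] at h6; omega)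
    | simp [pvProcA, pvAltCore, PySem.List.pyRange, PySem.List.pyGet?, PySem.List.pyIdx?,
            PySem.List.slice, pvLabels, List.range_succ]

theorem pvLen_toChars (num : Int) (h : num.natAbs ≤ 999999) :
    1 ≤ (PySem.Int.toChars |num|).length ∧ (PySem.Int.toChars |num|).length ≤ 6 := by
  have hnn : ¬ (|num| < 0) := not_lt.mpr (abs_nonneg num)
  simp only [PySem.Int.toChars, if_neg hnn]
  refine ⟨Nat.length_toDigits_pos, (Nat.length_toDigits_le_iff (by norm_num) (by norm_num)).mpr ?_⟩
  have h1 : (|num|).toNat = num.natAbs := by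
    rw [Int.abs_eq_natAbs]; exact Int.toNat_natCast _
  have h2 : (10 : ℕ) ^ 6 = 1000000 := by norm_num
  rw [h1, h2]
  omega

-- ===== VERDICT (by name: the statement is the Claim_ definition above) =====
theorem process_spec : Claim_equal_process := by
  intro num initial _ hpre
  have h := pvLen_toChars num hpre
  exact pvKey _ h.1 h.2 initial
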